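-- pv_equiv track=rewrite | github.com/EduardaAChagas/questoes-hackerrank | hackerrank4.py | diagp
-- ===== SOURCE A (Python) =====
-- def diagp(arr):
--     somadiagp = 0
--     somadiags = 0
--     somatotal = 0
--     for i in range(len(arr)):
--         for j in range(len(arr)):
--             if i==j:
--                 somadiagp = somadiagp + arr[i][j]
--             if i == (len(arr) -1 -j):
--                 somadiags = somadiags + arr[i][j]
--     somatotal = somadiagp-somadiags
--     return abs(somatotal)
-- ===== SOURCE B (Python) =====
-- def diagp(arr):
--     n = len(arr)
--     s = 0
--     for i in range(n):
--         row = arr[i]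
--         s += row[i] - row[n - 1 - i]
--     return abs(s)
-- ===== Notes on version B (the rewrite author's own statement) =====
-- stated objective: faster
-- what changed: Replaced the O(n^2) nested scan over all (i,j) pairs (testing each pair for membership in either diagonal) by a single O(n) loop that directly indexes the two diagonal elements of row i.
import Mathlib
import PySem

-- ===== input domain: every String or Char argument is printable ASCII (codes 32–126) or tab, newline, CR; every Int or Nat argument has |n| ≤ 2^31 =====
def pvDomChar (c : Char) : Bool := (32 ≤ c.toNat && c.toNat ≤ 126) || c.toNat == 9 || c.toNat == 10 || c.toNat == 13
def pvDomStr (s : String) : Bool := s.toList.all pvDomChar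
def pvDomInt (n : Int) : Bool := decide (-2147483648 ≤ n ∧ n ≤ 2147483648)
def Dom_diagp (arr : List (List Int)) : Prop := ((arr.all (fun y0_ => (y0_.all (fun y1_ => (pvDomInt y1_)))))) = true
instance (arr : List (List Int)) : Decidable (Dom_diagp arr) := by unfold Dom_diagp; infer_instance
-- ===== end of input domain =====

-- B replaces A's O(n^2) nested scan over all (i,j) pairs by one O(n) pass indexing the two
-- diagonal cells of each row (objective: faster, asymptotic).

-- ===== PORT A =====
-- literal transliteration of A's nested loops; arr[i][j] via pyGetD (in range under Pre_)
def diagp (arr : List (List Int)) : Int :=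
  let n : Int := (arr.length : Int)
  let st :=
    (PySem.List.pyRange 0 n 1).foldl (fun (st : Int × Int) i =>
      (PySem.List.pyRange 0 n 1).foldl (fun (st : Int × Int) j =>
        let st := if i = j then (st.1 + PySem.List.pyGetD (PySem.List.pyGetD arr i []) j 0, st.2) else st
        if i = n - 1 - j then (st.1, st.2 + PySem.List.pyGetD (PySem.List.pyGetD arr i []) j 0) else st)
        st)
      (0, 0)
  |st.1 - st.2|

-- ===== PORT B =====
-- literal transliteration of Source B: single pass over i
def diagp_alt (arr : List (List Int)) : Int :=
  let n : Int := (arr.length : Int)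
  let s :=
    (PySem.List.pyRange 0 n 1).foldl (fun (s : Int) i =>
      let row := PySem.List.pyGetD arr i []
      s + PySem.List.pyGetD row i 0 - PySem.List.pyGetD row (n - 1 - i) 0)
      0
  |s|

-- ===== PRECONDITION & SPEC =====
-- A indexes arr[i][j] for all 0 ≤ i,j < len(arr): it raises IndexError iff some row is
-- shorter than len(arr); exactly those inputs are excluded.
def Pre_diagp (arr : List (List Int)) : Prop :=
  ∀ row ∈ arr, arr.length ≤ row.length
instance (arr : List (List Int)) : Decidable (Pre_diagp arr) := by unfold Pre_diagp; infer_instance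
def pvWitness_diagp : List (List Int) := [[1, 2], [3, 4]]

def Spec_diagp (arr : List (List Int)) (out : Int) : Prop := out = diagp_alt arr
instance (arr : List (List Int)) (out : Int) : Decidable (Spec_diagp arr out) := by unfold Spec_diagp; infer_instance

-- ===== CLAIM (what is proved, stated in full; the proofs are below) =====
def Claim_equal_diagp : Prop := ∀ (arr : List (List Int)), Dom_diagp arr → Pre_diagp arr → Spec_diagp arr (diagp arr)

-- ===== LEMMAS AND PROOFS =====

-- A's inner loop over an arbitrary list of column indices: each component collects its
-- diagonal cell once per occurrence of the matching column index
lemma inner_fold (arr : List (List Int)) (n i : Int) (js : List Int) (st : Int × Int) :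
    js.foldl (fun (st : Int × Int) j =>
        if i = n - 1 - j then
          ((if i = j then (st.1 + PySem.List.pyGetD (PySem.List.pyGetD arr i []) j 0, st.2) else st).1,
           (if i = j then (st.1 + PySem.List.pyGetD (PySem.List.pyGetD arr i []) j 0, st.2) else st).2
             + PySem.List.pyGetD (PySem.List.pyGetD arr i []) j 0)
        else if i = j then (st.1 + PySem.List.pyGetD (PySem.List.pyGetD arr i []) j 0, st.2) else st) st
      = (st.1 + (js.count i : Int) * PySem.List.pyGetD (PySem.List.pyGetD arr i []) i 0,
         st.2 + (js.count (n - 1 - i) : Int) * PySem.List.pyGetD (PySem.List.pyGetD arr i []) (n - 1 - i) 0) := by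
  induction js generalizing st with
  | nil => simp
  | cons j js ih =>
      simp only [List.foldl_cons]
      by_cases h1 : i = j
      · subst h1
        by_cases h2 : i = n - 1 - i
        · rw [if_pos h2, if_pos rfl, ih]
          have h2' : n - 1 - i = i := h2.symm
          rw [h2']
          simp only [List.count_cons, Prod.ext_iff]
          simp
          constructor <;> push_cast <;> first | exact Or.inl (by omega) | omega | ring
        · have e : ¬ (n - 1 - i = i) := fun h => h2 h.symm
          rw [if_neg h2, if_pos rfl, ih]
          simp only [List.count_cons, Prod.ext_iff]
          simp [e]
          constructor <;> push_cast <;> first | exact Or.inl (by omega) | omega | ring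
      · by_cases h2 : i = n - 1 - j
        · have e' : j = n - 1 - i := by omega
          have e2 : ¬ (i = n - 1 - i) := by omega
          rw [if_pos h2, if_neg h1, ih, e']
          simp only [List.count_cons, Prod.ext_iff]
          simp [e2]
          constructor <;> push_cast <;> first | exact Or.inl (by omega) | omega | ring
        · have e2 : ¬ (i = j) := h1
          have e3 : ¬ (n - 1 - i = j) := by omega
          have e4 : ¬ (j = n - 1 - i) := by omega
          rw [if_neg h2, if_neg h1, ih]
          simp [List.count_cons, e2, e3, e4, Prod.ext_iff]
          exact Or.inl fun h => h1 h.symm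

lemma count_range_one (n x : Int) (h0 : 0 ≤ x) (hx : x < n) :
    (PySem.List.pyRange 0 n 1).count x = 1 := by
  have hm : x ∈ PySem.List.pyRange 0 n 1 := by
    rw [PySem.List.mem_pyRange_one]; omega
  exact List.count_eq_one_of_mem (PySem.List.nodup_pyRange_one 0 n) hm

-- A's pair-state outer fold, with each inner loop summarised, projects to B's fold
lemma outer_fold (arr : List (List Int)) (n : Int) (is : List Int) (p s : Int) :
    (is.foldl (fun (st : Int × Int) i =>
        (st.1 + PySem.List.pyGetD (PySem.List.pyGetD arr i []) i 0,
         st.2 + PySem.List.pyGetD (PySem.List.pyGetD arr i []) (n - 1 - i) 0)) (p, s)).1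
      - (is.foldl (fun (st : Int × Int) i =>
        (st.1 + PySem.List.pyGetD (PySem.List.pyGetD arr i []) i 0,
         st.2 + PySem.List.pyGetD (PySem.List.pyGetD arr i []) (n - 1 - i) 0)) (p, s)).2
      = is.foldl (fun (s : Int) i =>
          s + PySem.List.pyGetD (PySem.List.pyGetD arr i []) i 0
            - PySem.List.pyGetD (PySem.List.pyGetD arr i []) (n - 1 - i) 0) (p - s) := by
  induction is generalizing p s with
  | nil => simp
  | cons i is ih => simp only [List.foldl_cons]; rw [ih]; ring_nf

-- ===== VERDICT (by name: the statement is the Claim_ definition above) =====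
theorem diagp_spec : Claim_equal_diagp := by
  intro arr _ _
  unfold Spec_diagp diagp diagp_alt
  dsimp only
  have hcong := PySem.List.foldl_congr_mem (PySem.List.pyRange 0 (arr.length : Int) 1)
    (fun (st : Int × Int) i =>
      (PySem.List.pyRange 0 (arr.length : Int) 1).foldl (fun (st : Int × Int) j =>
        if i = (arr.length : Int) - 1 - j then
          ((if i = j then (st.1 + PySem.List.pyGetD (PySem.List.pyGetD arr i []) j 0, st.2) else st).1,
           (if i = j then (st.1 + PySem.List.pyGetD (PySem.List.pyGetD arr i []) j 0, st.2) else st).2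
             + PySem.List.pyGetD (PySem.List.pyGetD arr i []) j 0)
        else if i = j then (st.1 + PySem.List.pyGetD (PySem.List.pyGetD arr i []) j 0, st.2) else st) st)
    (fun (st : Int × Int) i =>
      (st.1 + PySem.List.pyGetD (PySem.List.pyGetD arr i []) i 0,
       st.2 + PySem.List.pyGetD (PySem.List.pyGetD arr i []) ((arr.length : Int) - 1 - i) 0))
    (0, 0)
    (by
      intro st i hi
      dsimp only
      rw [PySem.List.mem_pyRange_one] at hi
      rw [inner_fold]
      rw [count_range_one _ _ hi.1 hi.2, count_range_one _ _ (by omega) (by omega)]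
      simp)
  rw [hcong, outer_fold]
  norm_num
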